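-- pv_equiv track=rewrite | github.com/josephyooo/keynote-cli | keynote_cli/common.py | applescript_string
-- ===== SOURCE A (Python) =====
-- from typing import Any, NoReturn
--
-- def applescript_string(value: Any) -> str:
--     if value is None:
--         value = ""
--     if not isinstance(value, str):
--         value = str(value)
--     value = value.replace("\r\n", "\n").replace("\r", "\n")
--     parts = value.split("\n")
--     escaped_parts = []
--     for part in parts:
--         escaped = part.replace("\\", "\\\\").replace('"', '\\"')
--         escaped_parts.append(f'"{escaped}"')
--     return " & linefeed & ".join(escaped_parts)
-- ===== SOURCE B (Python) =====
-- def applescript_string(value):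
--     if value is None:
--         value = ""
--     if not isinstance(value, str):
--         value = str(value)
--     value = value.replace("\r\n", "\n").replace("\r", "\n")
--     out = '"'
--     for ch in value:
--         if ch == '\\':
--             out += '\\\\'
--         elif ch == '"':
--             out += '\\"'
--         elif ch == '\n':
--             out += '" & linefeed & "'
--         else:
--             out += ch
--     return out + '"'
-- ===== Notes on version B (the rewrite author's own statement) =====
-- stated objective: simpler
-- what changed: Replaces A's split-on-newline / escape-each-part / join pipeline with one character-by-character pass over the normalized string that emits each char's escape (or the linefeed separator) directly.
import Mathlib
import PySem

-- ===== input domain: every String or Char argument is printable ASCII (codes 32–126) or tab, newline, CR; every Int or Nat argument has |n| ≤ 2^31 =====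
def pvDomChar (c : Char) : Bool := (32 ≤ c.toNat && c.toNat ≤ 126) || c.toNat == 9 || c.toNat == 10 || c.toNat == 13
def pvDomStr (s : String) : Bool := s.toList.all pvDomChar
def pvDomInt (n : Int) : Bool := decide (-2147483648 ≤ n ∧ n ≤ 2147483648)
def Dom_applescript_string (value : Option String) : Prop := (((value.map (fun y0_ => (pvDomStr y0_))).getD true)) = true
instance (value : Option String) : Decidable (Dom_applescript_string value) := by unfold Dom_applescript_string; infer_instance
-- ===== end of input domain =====

-- B replaces A's split/escape-each-part/join pipeline by a single character scan emitting escapes directly (simpler decomposition, same cost).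

-- ===== PORT A =====
-- A: normalize newlines, split on '\n', escape backslash then quote in each part, wrap each part in quotes, join with " & linefeed & ".
def applescript_string (value : Option String) : String :=
  let v : String := match value with
    | none => ""
    | some s => s
  let norm : List Char :=
    PySem.Chars.replace (PySem.Chars.replace v.toList "\r\n".toList "\n".toList) "\r".toList "\n".toList
  let parts : List (List Char) := PySem.Chars.splitOn norm "\n".toList
  let escapedParts : List (List Char) :=
    parts.foldl (fun acc part =>
      acc ++ [['"'] ++
        PySem.Chars.replace (PySem.Chars.replace part "\\".toList "\\\\".toList) "\"".toList "\\\"".toList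
        ++ ['"']]) []
  String.ofList (PySem.Chars.join " & linefeed & ".toList escapedParts)

-- ===== PORT B =====
-- per-character escape used by B's loop
def ascEsc (c : Char) : List Char :=
  if c = '\\' then ['\\', '\\']
  else if c = '"' then ['\\', '"']
  else if c = '\n' then "\" & linefeed & \"".toList
  else [c]

def applescript_string_alt (value : Option String) : String :=
  let v : String := match value with
    | none => ""
    | some s => s
  let norm : List Char :=
    PySem.Chars.replace (PySem.Chars.replace v.toList "\r\n".toList "\n".toList) "\r".toList "\n".toList
  String.ofList ((norm.foldl (fun out c => out ++ ascEsc c) ['"']) ++ ['"'])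

-- ===== PRECONDITION & SPEC =====
def Spec_applescript_string (value : Option String) (out : String) : Prop := out = applescript_string_alt value
instance (value : Option String) (out : String) : Decidable (Spec_applescript_string value out) := by unfold Spec_applescript_string; infer_instance

-- ===== CLAIM (what is proved, stated in full; the proofs are below) =====
def Claim_equal_applescript_string : Prop := ∀ (value : Option String), Dom_applescript_string value → Spec_applescript_string value (applescript_string value)

-- ===== LEMMAS AND PROOFS =====

-- single-character escape view of A's two replaces
def escChar (c : Char) : List Char :=
  if c = '\\' then ['\\', '\\']
  else if c = '"' then ['\\', '"']
  else [c]

-- structural model of splitting on the single char s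
def sp (s : Char) : List Char → List (List Char)
  | [] => [[]]
  | c :: t => if c = s then [] :: sp s t else (sp s t).modifyHead (c :: ·)

lemma modifyHead_id {α : Type} (l : List α) : l.modifyHead (fun x => x) = l := by
  cases l <;> simp

lemma sp_cons_self (s : Char) (t : List Char) : sp s (s :: t) = [] :: sp s t := by
  simp [sp]

lemma sp_cons_ne {c s : Char} (hc : c ≠ s) (t : List Char) :
    sp s (c :: t) = (sp s t).modifyHead (c :: ·) := by
  simp [sp, hc]

lemma replace_go_single (o : Char) (new : List Char) :
    ∀ (l acc : List Char) (fuel : Nat), l.length ≤ fuel →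
      PySem.Chars.replace.go [o] new fuel l acc =
        acc.reverse ++ l.flatMap (fun c => if c = o then new else [c]) := by
  intro l
  induction l with
  | nil =>
      intro acc fuel _
      cases fuel <;> simp [PySem.Chars.replace.go]
  | cons c t ih =>
      intro acc fuel hf
      cases fuel with
      | zero => simp at hf
      | succ fuel =>
        simp only [PySem.Chars.replace.go]
        by_cases hc : c = o
        · subst hc
          simp only [List.isPrefixOf, beq_self_eq_true, Bool.true_and, if_pos]
          rw [show List.drop [c].length (c :: t) = t from rfl,
            ih (new.reverse ++ acc) fuel (by simpa using hf)]
          simp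
        · have hpre : [o].isPrefixOf (c :: t) = false := by
            simp [List.isPrefixOf]
            intro h; exact absurd h.symm hc
          rw [hpre]
          simp only [Bool.false_eq_true, if_false]
          rw [ih (c :: acc) fuel (by simpa using hf)]
          simp [hc]

lemma replace_single (o : Char) (new l : List Char) :
    PySem.Chars.replace l [o] new = l.flatMap (fun c => if c = o then new else [c]) := by
  simp only [PySem.Chars.replace, List.isEmpty_cons, Bool.false_eq_true, if_false]
  exact replace_go_single o new l [] l.length (le_refl _)

lemma splitOn_go_single (s : Char) :
    ∀ (l cur : List Char) (acc : List (List Char)) (fuel : Nat), l.length ≤ fuel →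
      PySem.Chars.splitOn.go [s] fuel l cur acc =
        acc.reverse ++ (sp s l).modifyHead (cur.reverse ++ ·) := by
  intro l
  induction l with
  | nil =>
      intro cur acc fuel _
      cases fuel <;> simp [PySem.Chars.splitOn.go, sp]
  | cons c t ih =>
      intro cur acc fuel hf
      cases fuel with
      | zero => simp at hf
      | succ fuel =>
        simp only [PySem.Chars.splitOn.go]
        by_cases hc : c = s
        · subst hc
          simp only [List.isPrefixOf, beq_self_eq_true, Bool.true_and, if_pos]
          rw [show List.drop [c].length (c :: t) = t from rfl,
            ih [] (cur.reverse :: acc) fuel (by simpa using hf), sp_cons_self]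
          simp [modifyHead_id]
        · have hpre : [s].isPrefixOf (c :: t) = false := by
            simp [List.isPrefixOf]
            intro h; exact absurd h.symm hc
          rw [hpre]
          simp only [Bool.false_eq_true, if_false]
          rw [ih (c :: cur) acc fuel (by simpa using hf), sp_cons_ne hc,
            List.modifyHead_modifyHead]
          congr 2
          funext x
          simp

lemma splitOn_single (s : Char) (l : List Char) :
    PySem.Chars.splitOn l [s] = sp s l := by
  have h := splitOn_go_single s l [] [] (l.length + 1) (by omega)
  simpa [PySem.Chars.splitOn, modifyHead_id] using h

lemma esc_eq_flatMap (p : List Char) :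
    PySem.Chars.replace (PySem.Chars.replace p "\\".toList "\\\\".toList) "\"".toList "\\\"".toList
      = p.flatMap escChar := by
  have h1 : "\\".toList = ['\\'] := rfl
  have h2 : "\"".toList = ['"'] := rfl
  rw [h1, h2, replace_single, replace_single]
  induction p with
  | nil => simp
  | cons c t ih =>
      simp only [List.flatMap_cons, List.flatMap_append, ih, escChar]
      by_cases hb : c = '\\'
      · subst hb; simp
      · by_cases hq : c = '"'
        · subst hq; simp
        · simp [hb, hq]

lemma sp_ne_nil (s : Char) (l : List Char) : sp s l ≠ [] := by
  induction l with
  | nil => simp [sp]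
  | cons c t ih =>
      by_cases hc : c = s
      · simp [sp, hc]
      · simp only [sp, if_neg hc]
        cases h : sp s t with
        | nil => exact absurd h ih
        | cons p ps => simp

-- the quoted-part wrapper of A
def wrapQ (p : List Char) : List Char := ['"'] ++ p.flatMap escChar ++ ['"']

lemma join_map_sp (cs pre : List Char) :
    PySem.Chars.join " & linefeed & ".toList (((sp '\n' cs).modifyHead (pre ++ ·)).map wrapQ)
      = ['"'] ++ pre.flatMap escChar ++ cs.flatMap ascEsc ++ ['"'] := by
  induction cs generalizing pre with
  | nil =>
      simp [sp, PySem.Chars.join, List.intercalate, wrapQ]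
  | cons c t ih =>
      by_cases hc : c = '\n'
      · subst hc
        rw [sp_cons_self]
        simp only [List.modifyHead_cons, List.map_cons]
        obtain ⟨p, ps, hps⟩ : ∃ p ps, sp '\n' t = p :: ps := by
          cases h : sp '\n' t with
          | nil => exact absurd h (sp_ne_nil _ _)
          | cons p ps => exact ⟨p, ps, rfl⟩
        have hIH := ih ([])
        simp only [List.nil_append, modifyHead_id] at hIH
        rw [hps] at hIH ⊢
        simp only [List.map_cons] at hIH ⊢
        have hstep : ∀ (a b : List Char) (l : List (List Char)),
            PySem.Chars.join " & linefeed & ".toList (a :: b :: l) =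
              a ++ " & linefeed & ".toList ++ PySem.Chars.join " & linefeed & ".toList (b :: l) := by
          intro a b l
          simp [PySem.Chars.join, List.intercalate]
        rw [hstep, hIH]
        simp only [wrapQ, ascEsc, List.flatMap_cons]
        simp [List.append_assoc]
      · rw [sp_cons_ne hc, List.modifyHead_modifyHead]
        have : ((fun x => pre ++ x) ∘ (fun x => c :: x)) = (fun x => (pre ++ [c]) ++ x) := by
          funext x; simp
        rw [this, ih (pre ++ [c])]
        simp only [List.flatMap_append, List.flatMap_cons, List.flatMap_nil, List.append_nil,
          List.flatMap_nil]
        have : ascEsc c = escChar c := by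
          simp [ascEsc, escChar, hc]
        rw [this]
        simp [List.append_assoc]

lemma core (norm : List Char) :
    PySem.Chars.join " & linefeed & ".toList
      ((PySem.Chars.splitOn norm "\n".toList).foldl (fun acc part =>
        acc ++ [['"'] ++
          PySem.Chars.replace (PySem.Chars.replace part "\\".toList "\\\\".toList) "\"".toList "\\\"".toList
          ++ ['"']]) [])
      = (norm.foldl (fun out c => out ++ ascEsc c) ['"']) ++ ['"'] := by
  have hn : "\n".toList = ['\n'] := rfl
  have hfold1 : ∀ (l : List (List Char)),
      l.foldl (fun acc part =>
        acc ++ [['"'] ++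
          PySem.Chars.replace (PySem.Chars.replace part "\\".toList "\\\\".toList) "\"".toList "\\\"".toList
          ++ ['"']]) [] = l.map wrapQ := by
    intro l
    rw [PySem.List.foldl_append_singleton_eq_map]
    exact List.map_congr_left (fun p _ => by rw [wrapQ, esc_eq_flatMap])
  rw [hfold1, hn, splitOn_single, PySem.List.foldl_append_eq_flatMap]
  have := join_map_sp norm []
  simpa [modifyHead_id] using this

-- ===== VERDICT (by name: the statement is the Claim_ definition above) =====
theorem applescript_string_spec : Claim_equal_applescript_string := by
  intro value _
  unfold Spec_applescript_string applescript_string applescript_string_alt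
  exact congrArg String.ofList (core _)
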